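/-
  THE HAND-WRITTEN HALF OF THE FIELD VOCABULARY: addresses, typed reads, frame facts, blocks.
  The documentation of the whole vocabulary is the header of Vorbis/Fields.lean; read that first.
  (The generated half, Vorbis/Fields/Offsets.lean, imports this file.)
-/
import Asan.Shadow
import Vorbis.Fields.Attr
namespace Vorbis
open X86 X86.User Asan

/-! ### 1. Addresses: numbers on the invariant side, words in the machine

An address in an invariant is a `Nat`. The word the machine holds for it is `addr a`. `addr` is ALSO the way to say
"this register holds the number `n`": `u.reg .rax = addr n`. Arithmetic on `addr` needs no wrap-around condition
(`addr_add`, `addr_mul`: `UInt64.ofNat` is a ring homomorphism); only going BACK to a number does (`toNat_addr`). -/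

/-- The machine word of the number `a` (an address, or any value known as a number). -/
def addr (a : Nat) : Word := UInt64.ofNat a

/-- Back to the number: the only place where a bound is needed. Every address of this proof is below `1000000H`. -/
theorem toNat_addr (a : Nat) (h : a < 2 ^ 64) : (addr a).toNat = a := by
  unfold addr
  rw [UInt64.toNat_ofNat']
  omega

/-- A word IS the `addr` of its value: turns a register `w` into normal form (`rw [← addr_toNat w]`). -/
theorem addr_toNat (w : Word) : addr w.toNat = w := UInt64.ofNat_toNat

/-- A word whose value is known is the `addr` of that value (the form an invariant gives: `(u.reg r).toNat = f`). -/
theorem eq_addr (w : Word) (a : Nat) (h : w.toNat = a) : w = addr a := by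
  rw [← h, addr_toNat]

/-- Different numbers below `2^64` are different words. -/
theorem addr_inj (a b : Nat) (ha : a < 2 ^ 64) (hb : b < 2 ^ 64) (h : addr a = addr b) : a = b := by
  have e := congrArg UInt64.toNat h
  rw [toNat_addr a ha, toNat_addr b hb] at e
  exact e

/-- Base plus offset, the offset as `UInt64.ofNat`. -/
@[vfield] theorem addr_add (a k : Nat) : addr a + UInt64.ofNat k = addr (a + k) :=
  (UInt64.ofNat_add a k).symm

/-- Base plus offset, the offset a numeral: `rbx + 2112`, as the stepper prints a displacement. -/
@[vfield] theorem addr_add_lit (a k : Nat) : addr a + (no_index (OfNat.ofNat k) : Word) = addr (a + OfNat.ofNat k) :=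
  (UInt64.ofNat_add a k).symm

/-- Base plus index register. -/
@[vfield] theorem addr_add_addr (a b : Nat) : addr a + addr b = addr (a + b) :=
  (UInt64.ofNat_add a b).symm

/-- A scaled index, `rcx * 4`. -/
@[vfield] theorem addr_mul_lit (a k : Nat) : addr a * (no_index (OfNat.ofNat k) : Word) = addr (a * OfNat.ofNat k) :=
  (UInt64.ofNat_mul a k).symm

/-- A scaled index with the scale as a word. -/
@[vfield] theorem addr_mul_addr (a b : Nat) : addr a * addr b = addr (a * b) :=
  (UInt64.ofNat_mul a b).symm

/-- Base minus a numeral (`rsp - 8`): needs `k ≤ a`. -/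
theorem addr_sub_lit (a k : Nat) (h : k ≤ a) : addr a - (no_index (OfNat.ofNat k) : Word) = addr (a - OfNat.ofNat k) :=
  (UInt64.ofNat_sub h).symm

/-- A numeral word is the `addr` of the numeral (an absolute address in the code, `mov edi, 0x120aa0`). -/
theorem lit_eq_addr (k : Nat) : (no_index (OfNat.ofNat k) : Word) = addr (OfNat.ofNat k) := id rfl

/-- The shadow's own addresses (Asan/Shadow.lean) are `addr`s too. -/
theorem shadowAddr_eq_addr (g : Nat) : shadowAddr g = addr (0xC00000 + g) := id rfl

/-- An offset in a `Region` of the model's frame vocabulary (X86/Derived/User/Frame.lean) is the same base-plus-offset. -/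
theorem region_at_eq_addr {L : Layout} (R : Region L) (off : Nat) : R.at off = addr (R.base.toNat + off) := by
  unfold Region.at
  rw [← addr_add, addr_toNat]

/-- The side condition `L.Has` of a load or store, for an `addr`. -/
theorem has_addr (L : Layout) (a n : Nat) (h : a < 2 ^ 64) (h1 : L.lo ≤ a) (h2 : a + n ≤ L.hi) : L.Has (addr a) n := by
  unfold Layout.Has
  rw [toNat_addr a h]
  exact ⟨h1, h2⟩

/-! ### 2. Signed values

A C `int` field is read as an `Int`. The conversion from the unsigned reading is a plain `if`, so that `omega` decides
everything about it once it is unfolded; `sint32_cases` is the unfolded form. -/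

/-- The signed reading of a byte. -/
def sint8 (n : Nat) : Int := if n < 128 then (n : Int) else (n : Int) - 256

/-- The signed reading of a 16-bit value. -/
def sint16 (n : Nat) : Int := if n < 32768 then (n : Int) else (n : Int) - 65536

/-- The signed reading of a 32-bit value. -/
def sint32 (n : Nat) : Int := if n < 2147483648 then (n : Int) else (n : Int) - 4294967296

/-- Both cases of `sint8`, for `omega`. -/
theorem sint8_cases (n : Nat) : (n < 128 ∧ sint8 n = n) ∨ (128 ≤ n ∧ sint8 n = (n : Int) - 256) := by
  unfold sint8
  split <;> omega

/-- Both cases of `sint16`, for `omega`. -/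
theorem sint16_cases (n : Nat) : (n < 32768 ∧ sint16 n = n) ∨ (32768 ≤ n ∧ sint16 n = (n : Int) - 65536) := by
  unfold sint16
  split <;> omega

/-- Both cases of `sint32`, for `omega`. -/
theorem sint32_cases (n : Nat) :
    (n < 2147483648 ∧ sint32 n = n) ∨ (2147483648 ≤ n ∧ sint32 n = (n : Int) - 4294967296) := by
  unfold sint32
  split <;> omega

/-- `sint8` is the two's-complement value of the byte. -/
theorem toInt_ofNat8 (n : Nat) (h : n < 2 ^ 8) : (BitVec.ofNat 8 n).toInt = sint8 n := by
  rw [BitVec.toInt_eq_toNat_cond, BitVec.toNat_ofNat]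
  have e : n % 2 ^ 8 = n := Nat.mod_eq_of_lt h
  rw [e]
  unfold sint8
  split <;> split <;> omega

/-- `sint16` is the two's-complement value of the 16-bit vector. -/
theorem toInt_ofNat16 (n : Nat) (h : n < 2 ^ 16) : (BitVec.ofNat 16 n).toInt = sint16 n := by
  rw [BitVec.toInt_eq_toNat_cond, BitVec.toNat_ofNat]
  have e : n % 2 ^ 16 = n := Nat.mod_eq_of_lt h
  rw [e]
  unfold sint16
  split <;> split <;> omega

/-- `sint32` is the two's-complement value of the 32-bit vector. -/
theorem toInt_ofNat32 (n : Nat) (h : n < 2 ^ 32) : (BitVec.ofNat 32 n).toInt = sint32 n := by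
  rw [BitVec.toInt_eq_toNat_cond, BitVec.toNat_ofNat]
  have e : n % 2 ^ 32 = n := Nat.mod_eq_of_lt h
  rw [e]
  unfold sint32
  split <;> split <;> omega

/-- The machine word of an integer: what a sign-extending load (`movsxd r64, [m]`) leaves in a 64-bit register. -/
def word (i : Int) : Word := addr (i % 18446744073709551616).toNat

/-- A non-negative integer's word is the `addr` of its value. -/
theorem word_nonneg (i : Int) (h : 0 ≤ i) : word i = addr i.toNat := by
  unfold word addr
  have e : (i % 18446744073709551616).toNat = i.toNat % 2 ^ 64 := by omega
  rw [e]
  exact UInt64.ofNat_mod_size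

/-- The word a 32-bit register write leaves for the integer `i` (sign-extended to 32 bits, then zero-extended:
`movsx eax, word [m]`). For `0 ≤ i` it is `addr i.toNat`: `word32_nonneg`. -/
def word32 (i : Int) : Word := addr (i % 4294967296).toNat

/-- A non-negative 32-bit value's `word32` is the `addr` of its value. -/
theorem word32_nonneg (i : Int) (h : 0 ≤ i) (h2 : i < 4294967296) : word32 i = addr i.toNat := by
  unfold word32
  have e : i % 4294967296 = i := Int.emod_eq_of_lt h h2
  rw [e]

/-- A value of at most 64 bits, extended to a word, is the `addr` of its number. -/
theorem ofBV_eq_addr {k : Nat} (v : BitVec k) (hk : k ≤ 64) : Word.ofBV v = addr v.toNat := by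
  have hv := v.isLt
  have hp : 2 ^ k ≤ 2 ^ 64 := Nat.pow_le_pow_right (by decide) hk
  apply UInt64.toNat_inj.mp
  rw [toNat_addr _ (by omega)]
  unfold Word.ofBV
  rw [UInt64.toNat_ofBitVec, BitVec.toNat_setWidth]
  exact Nat.mod_eq_of_lt (by omega)

/-- A value sign-extended to 64 bits is the `word` of its signed value. -/
theorem ofBV_signExtend64 {k : Nat} (v : BitVec k) : Word.ofBV (BitVec.signExtend 64 v) = word v.toInt := by
  rw [ofBV_eq_addr _ (Nat.le_refl 64)]
  unfold word BitVec.signExtend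
  rw [BitVec.toNat_ofInt]
  rfl

/-- A value sign-extended to 32 bits (and, as every 32-bit register write, zero-extended from there) is the `word32` of its
signed value. -/
theorem ofBV_signExtend32 {k : Nat} (v : BitVec k) : Word.ofBV (BitVec.signExtend 32 v) = word32 v.toInt := by
  rw [ofBV_eq_addr _ (by decide)]
  unfold word32 BitVec.signExtend
  rw [BitVec.toNat_ofInt]
  rfl

end Vorbis

/-! ### 3. Typed reads of the flat memory at a number address, by C type

    mem.u8 a  mem.u16 a  mem.u32 a  mem.u64 a : Nat        uint8 / uint16 / uint32, unsigned int / u64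
    mem.i8 a  mem.i16 a  mem.i32 a            : Int        int8 / int16 / int, int32           (= sintN of the unsigned read)
    mem.ptr a                                 : Nat        any pointer: the ADDRESS stored in the 8 bytes at `a`  (= mem.u64 a)
    mem.f32bits a                             : Nat        float: its 32 bits; the value is opaque       (= mem.u32 a)

The four unsigned reads are THE NORMAL FORM: they are what a load of the stepper rewrites to (`simp only [vfield]`), and what
`simp only [vacc]` unfolds `ptr`, `f32bits` and the accessors to. The signed reads stay as they are (`mem.i32 a`); their
relation to the unsigned ones is `i32_cases`. -/

namespace X86.User.Mem
open Vorbis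

/-- The byte at `a`, as a number. -/
def u8 (mem : Mem) (a : Nat) : Nat := mem.readLE (addr a) 1

/-- The `uint16` at `a`. -/
def u16 (mem : Mem) (a : Nat) : Nat := mem.readLE (addr a) 2

/-- The `uint32` / `unsigned int` at `a`. -/
def u32 (mem : Mem) (a : Nat) : Nat := mem.readLE (addr a) 4

/-- The 64-bit unsigned value at `a`. -/
def u64 (mem : Mem) (a : Nat) : Nat := mem.readLE (addr a) 8

/-- The `int8` / `signed char` at `a`. -/
def i8 (mem : Mem) (a : Nat) : Int := sint8 (mem.u8 a)

/-- The `int16` / `short` at `a`. -/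
def i16 (mem : Mem) (a : Nat) : Int := sint16 (mem.u16 a)

/-- The `int` / `int32` at `a`. -/
def i32 (mem : Mem) (a : Nat) : Int := sint32 (mem.u32 a)

/-- The pointer stored at `a`: an address, as a number. -/
def ptr (mem : Mem) (a : Nat) : Nat := mem.u64 a

/-- The 32 bits of the `float` at `a`. Floating-point values are opaque in this proof: only "which bits" is ever said. -/
def f32bits (mem : Mem) (a : Nat) : Nat := mem.u32 a

/-- `ptr` is the 64-bit read (the normal form). -/
@[vacc] theorem ptr_eq (mem : Mem) (a : Nat) : mem.ptr a = mem.u64 a := id rfl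

/-- `f32bits` is the 32-bit read (the normal form). -/
@[vacc] theorem f32bits_eq (mem : Mem) (a : Nat) : mem.f32bits a = mem.u32 a := id rfl

/-- The signed read in terms of the unsigned one. -/
theorem i8_def (mem : Mem) (a : Nat) : mem.i8 a = sint8 (mem.u8 a) := id rfl

/-- The signed read in terms of the unsigned one. -/
theorem i16_def (mem : Mem) (a : Nat) : mem.i16 a = sint16 (mem.u16 a) := id rfl

/-- The signed read in terms of the unsigned one. -/
theorem i32_def (mem : Mem) (a : Nat) : mem.i32 a = sint32 (mem.u32 a) := id rfl

/-! #### Ranges -/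

/-- A `k`-byte little-endian value is below `256 ^ k` (the flat memory's `PhysMem.readLE_lt`). -/
theorem readLE_lt' (mem : Mem) (w : Word) (k : Nat) : mem.readLE w k < 256 ^ k := by
  induction k generalizing w with
  | zero => exact Nat.one_pos
  | succ k ih =>
    simp only [readLE]
    have hb := (mem.read w).toNat_lt
    have hr := ih (w + 1)
    rw [Nat.pow_succ]
    omega

theorem u8_lt (mem : Mem) (a : Nat) : mem.u8 a < 2 ^ 8 := readLE_lt' mem (addr a) 1
theorem u16_lt (mem : Mem) (a : Nat) : mem.u16 a < 2 ^ 16 := readLE_lt' mem (addr a) 2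
theorem u32_lt (mem : Mem) (a : Nat) : mem.u32 a < 2 ^ 32 := readLE_lt' mem (addr a) 4
theorem u64_lt (mem : Mem) (a : Nat) : mem.u64 a < 2 ^ 64 := readLE_lt' mem (addr a) 8
theorem ptr_lt (mem : Mem) (a : Nat) : mem.ptr a < 2 ^ 64 := u64_lt mem a
theorem f32bits_lt (mem : Mem) (a : Nat) : mem.f32bits a < 2 ^ 32 := u32_lt mem a

/-- **Signed against unsigned, 8 bits**: both cases and the range of the unsigned read, ready for `omega`
(`have := mem.i8_cases a`). -/
theorem i8_cases (mem : Mem) (a : Nat) :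
    (mem.u8 a < 128 ∧ mem.i8 a = mem.u8 a) ∨ (128 ≤ mem.u8 a ∧ mem.u8 a < 256 ∧ mem.i8 a = (mem.u8 a : Int) - 256) := by
  have h1 := sint8_cases (mem.u8 a)
  have h2 := mem.u8_lt a
  rw [← i8_def] at h1
  omega

/-- **Signed against unsigned, 16 bits**: both cases and the range of the unsigned read, ready for `omega`. -/
theorem i16_cases (mem : Mem) (a : Nat) :
    (mem.u16 a < 32768 ∧ mem.i16 a = mem.u16 a) ∨
      (32768 ≤ mem.u16 a ∧ mem.u16 a < 65536 ∧ mem.i16 a = (mem.u16 a : Int) - 65536) := by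
  have h1 := sint16_cases (mem.u16 a)
  have h2 := mem.u16_lt a
  rw [← i16_def] at h1
  omega

/-- **Signed against unsigned, 32 bits**: both cases and the range of the unsigned read, ready for `omega`. -/
theorem i32_cases (mem : Mem) (a : Nat) :
    (mem.u32 a < 2147483648 ∧ mem.i32 a = mem.u32 a) ∨
      (2147483648 ≤ mem.u32 a ∧ mem.u32 a < 4294967296 ∧ mem.i32 a = (mem.u32 a : Int) - 4294967296) := by
  have h1 := sint32_cases (mem.u32 a)
  have h2 := mem.u32_lt a
  rw [← i32_def] at h1
  omega

/-- The range of an `int8`. -/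
theorem i8_range (mem : Mem) (a : Nat) : -128 ≤ mem.i8 a ∧ mem.i8 a < 128 := by
  have h1 := mem.i8_cases a
  have h2 := mem.u8_lt a
  omega

/-- The range of an `int16`. -/
theorem i16_range (mem : Mem) (a : Nat) : -32768 ≤ mem.i16 a ∧ mem.i16 a < 32768 := by
  have h1 := mem.i16_cases a
  have h2 := mem.u16_lt a
  omega

/-- The range of an `int`. -/
theorem i32_range (mem : Mem) (a : Nat) : -2147483648 ≤ mem.i32 a ∧ mem.i32 a < 2147483648 := by
  have h1 := mem.i32_cases a
  have h2 := mem.u32_lt a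
  omega

/-- A non-negative `int` is its unsigned reading (what an invariant `0 ≤ f.x` gives about the register). -/
theorem u32_of_i32_nonneg (mem : Mem) (a : Nat) (h : 0 ≤ mem.i32 a) : mem.u32 a = (mem.i32 a).toNat := by
  have h1 := mem.i32_cases a
  have h2 := mem.u32_lt a
  omega

/-- A non-negative `int16` is its unsigned reading. -/
theorem u16_of_i16_nonneg (mem : Mem) (a : Nat) (h : 0 ≤ mem.i16 a) : mem.u16 a = (mem.i16 a).toNat := by
  have h1 := mem.i16_cases a
  have h2 := mem.u16_lt a
  omega

/-- An unsigned reading below `2^31` is the `int`. -/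
theorem i32_of_u32_lt (mem : Mem) (a : Nat) (h : mem.u32 a < 2147483648) : mem.i32 a = mem.u32 a := by
  have h1 := mem.i32_cases a
  omega

/-! ### 4. From what the stepper produces to the typed reads  (`simp only [vfield]`)

A load in a walked instruction appears as `u.mem.readLE w k` with `w` a word expression (`rbx + 2112`,
`rbx + rcx * 4 + 8`), wrapped in what the instruction does with the value. With the base register in the form `addr f`
(`eq_addr`, from the invariant's `(u.reg r).toNat = f`), `vfield` turns the address into `addr (f + 2112)` (`addr_add_lit` …),
the load into `mem.u32 (f + 2112)`, and the register value into `addr n` (a number), `word i` (a sign-extension to 64 bits) or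
`word32 i` (a sign-extension to 32 bits):

    mov rax, [m]       UInt64.ofNat (readLE w 8)                                     addr (mem.u64 a)
    mov eax, [m]       Word.ofBV (BitVec.ofNat 32 (readLE w 4))                      addr (mem.u32 a)
    movzx eax, word    Word.ofBV (BitVec.zeroExtend 32 (BitVec.ofNat 16 (readLE w 2)))   addr (mem.u16 a)
    movzx eax, byte    Word.ofBV (BitVec.zeroExtend 32 (BitVec.ofNat 8 (readLE w 1)))    addr (mem.u8 a)
    movsxd rax, [m]    Word.ofBV (BitVec.signExtend 64 (BitVec.ofNat 32 (readLE w 4)))   word (mem.i32 a)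
    movsx rax, word    Word.ofBV (BitVec.signExtend 64 (BitVec.ofNat 16 (readLE w 2)))   word (mem.i16 a)
    movsx eax, word    Word.ofBV (BitVec.signExtend 32 (BitVec.ofNat 16 (readLE w 2)))   word32 (mem.i16 a)
    movsx eax, byte    Word.ofBV (BitVec.signExtend 32 (BitVec.ofNat 8 (readLE w 1)))    word32 (mem.i8 a)
    cmp / add …, [m]   BitVec.ofNat 32 (readLE w 4)   stays; its `.toNat` is `mem.u32 a`, its `.toInt` is `mem.i32 a`

The first four are definitional or need only the range of the read; all are stated for the read itself, so no side
condition is left. -/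

/-- A 1-byte load at an `addr`. -/
@[vfield] theorem readLE_addr1 (mem : Mem) (a : Nat) : mem.readLE (addr a) 1 = mem.u8 a := id rfl

/-- A 2-byte load at an `addr`. -/
@[vfield] theorem readLE_addr2 (mem : Mem) (a : Nat) : mem.readLE (addr a) 2 = mem.u16 a := id rfl

/-- A 4-byte load at an `addr`. -/
@[vfield] theorem readLE_addr4 (mem : Mem) (a : Nat) : mem.readLE (addr a) 4 = mem.u32 a := id rfl

/-- An 8-byte load at an `addr`. -/
@[vfield] theorem readLE_addr8 (mem : Mem) (a : Nat) : mem.readLE (addr a) 8 = mem.u64 a := id rfl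

/-- `mov r64, [m]`: the register holds the number read. -/
@[vfield] theorem ofNat_u64 (mem : Mem) (a : Nat) : UInt64.ofNat (mem.u64 a) = addr (mem.u64 a) := id rfl

/-- The 32-bit value of a 4-byte load, as a number. -/
@[vfield] theorem toNat_ofNat32_u32 (mem : Mem) (a : Nat) : (BitVec.ofNat 32 (mem.u32 a)).toNat = mem.u32 a := by
  rw [BitVec.toNat_ofNat]
  exact Nat.mod_eq_of_lt (mem.u32_lt a)

/-- The 16-bit value of a 2-byte load, as a number. -/
@[vfield] theorem toNat_ofNat16_u16 (mem : Mem) (a : Nat) : (BitVec.ofNat 16 (mem.u16 a)).toNat = mem.u16 a := by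
  rw [BitVec.toNat_ofNat]
  exact Nat.mod_eq_of_lt (mem.u16_lt a)

/-- The 8-bit value of a 1-byte load, as a number. -/
@[vfield] theorem toNat_ofNat8_u8 (mem : Mem) (a : Nat) : (BitVec.ofNat 8 (mem.u8 a)).toNat = mem.u8 a := by
  rw [BitVec.toNat_ofNat]
  exact Nat.mod_eq_of_lt (mem.u8_lt a)

/-- The 32-bit value of a 4-byte load, as a signed number. -/
@[vfield] theorem toInt_ofNat32_u32 (mem : Mem) (a : Nat) : (BitVec.ofNat 32 (mem.u32 a)).toInt = mem.i32 a :=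
  toInt_ofNat32 _ (mem.u32_lt a)

/-- The 16-bit value of a 2-byte load, as a signed number. -/
@[vfield] theorem toInt_ofNat16_u16 (mem : Mem) (a : Nat) : (BitVec.ofNat 16 (mem.u16 a)).toInt = mem.i16 a :=
  toInt_ofNat16 _ (mem.u16_lt a)

/-- The 8-bit value of a 1-byte load, as a signed number. -/
@[vfield] theorem toInt_ofNat8_u8 (mem : Mem) (a : Nat) : (BitVec.ofNat 8 (mem.u8 a)).toInt = mem.i8 a :=
  toInt_ofNat8 _ (mem.u8_lt a)

/-- `mov r32, [m]`: a 32-bit register write zero-extends, the register holds the number read. -/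
@[vfield] theorem ofBV_ofNat32_u32 (mem : Mem) (a : Nat) : Word.ofBV (BitVec.ofNat 32 (mem.u32 a)) = addr (mem.u32 a) := by
  rw [ofBV_eq_addr _ (by decide), toNat_ofNat32_u32]

/-- `movzx r32, word [m]`. -/
@[vfield] theorem ofBV_zeroExtend32_u16 (mem : Mem) (a : Nat) :
    Word.ofBV (BitVec.zeroExtend 32 (BitVec.ofNat 16 (mem.u16 a))) = addr (mem.u16 a) := by
  rw [ofBV_eq_addr _ (by decide), BitVec.toNat_setWidth, toNat_ofNat16_u16]
  have := mem.u16_lt a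
  congr 1
  omega

/-- `movzx r32, byte [m]`. -/
@[vfield] theorem ofBV_zeroExtend32_u8 (mem : Mem) (a : Nat) :
    Word.ofBV (BitVec.zeroExtend 32 (BitVec.ofNat 8 (mem.u8 a))) = addr (mem.u8 a) := by
  rw [ofBV_eq_addr _ (by decide), BitVec.toNat_setWidth, toNat_ofNat8_u8]
  have := mem.u8_lt a
  congr 1
  omega

/-- `movzx r64, word [m]`. -/
@[vfield] theorem ofBV_zeroExtend64_u16 (mem : Mem) (a : Nat) :
    Word.ofBV (BitVec.zeroExtend 64 (BitVec.ofNat 16 (mem.u16 a))) = addr (mem.u16 a) := by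
  rw [ofBV_eq_addr _ (by decide), BitVec.toNat_setWidth, toNat_ofNat16_u16]
  have := mem.u16_lt a
  congr 1
  omega

/-- `movzx r64, byte [m]`. -/
@[vfield] theorem ofBV_zeroExtend64_u8 (mem : Mem) (a : Nat) :
    Word.ofBV (BitVec.zeroExtend 64 (BitVec.ofNat 8 (mem.u8 a))) = addr (mem.u8 a) := by
  rw [ofBV_eq_addr _ (by decide), BitVec.toNat_setWidth, toNat_ofNat8_u8]
  have := mem.u8_lt a
  congr 1
  omega

/-- `movsxd r64, dword [m]`: the register holds the `int` read, as a `word`. -/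
@[vfield] theorem ofBV_signExtend64_u32 (mem : Mem) (a : Nat) :
    Word.ofBV (BitVec.signExtend 64 (BitVec.ofNat 32 (mem.u32 a))) = word (mem.i32 a) := by
  rw [ofBV_signExtend64, toInt_ofNat32_u32]

/-- `movsx r64, word [m]`. -/
@[vfield] theorem ofBV_signExtend64_u16 (mem : Mem) (a : Nat) :
    Word.ofBV (BitVec.signExtend 64 (BitVec.ofNat 16 (mem.u16 a))) = word (mem.i16 a) := by
  rw [ofBV_signExtend64, toInt_ofNat16_u16]

/-- `movsx r64, byte [m]`. -/
@[vfield] theorem ofBV_signExtend64_u8 (mem : Mem) (a : Nat) :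
    Word.ofBV (BitVec.signExtend 64 (BitVec.ofNat 8 (mem.u8 a))) = word (mem.i8 a) := by
  rw [ofBV_signExtend64, toInt_ofNat8_u8]

/-- `movsx r32, word [m]`. -/
@[vfield] theorem ofBV_signExtend32_u16 (mem : Mem) (a : Nat) :
    Word.ofBV (BitVec.signExtend 32 (BitVec.ofNat 16 (mem.u16 a))) = word32 (mem.i16 a) := by
  rw [ofBV_signExtend32, toInt_ofNat16_u16]

/-- `movsx r32, byte [m]`. -/
@[vfield] theorem ofBV_signExtend32_u8 (mem : Mem) (a : Nat) :
    Word.ofBV (BitVec.signExtend 32 (BitVec.ofNat 8 (mem.u8 a))) = word32 (mem.i8 a) := by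
  rw [ofBV_signExtend32, toInt_ofNat8_u8]

end X86.User.Mem

/-! ### 5. Frame: a typed read is unchanged by a store outside its bytes

ONE fact per read type, from the model's `Mem.EqOn lo hi mem mem'` ("`mem'` agrees with `mem` on `[lo, hi)`"):

    h.u32 a (h1 : lo ≤ a) (h2 : a + 4 ≤ hi) (h3 : hi ≤ 2 ^ 64) : mem'.u32 a = mem.u32 a          (h : Mem.EqOn lo hi mem mem')

and likewise `h.u8 h.u16 h.u64 h.i8 h.i16 h.i32 h.ptr h.f32bits`. They also prove the frame fact of an ACCESSOR, because an
accessor unfolds to a typed read: `exact h.i32 _ (by omega) (by omega) (by omega)` closes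
`stb_vorbis.channels mem' f = stb_vorbis.channels mem f` (put `simp only [voff]` before it when the bounds mention `Off.…`).
Where `EqOn` comes from (all in X86/Derived/User/Frame.lean):

    Mem.EqOn.writeLE lo hi mem w k x        one store outside `[lo, hi)`        Mem.EqOn.trans / .refl / .mono
    Mem.SameExcept.eqOn hs lo hi            a callee's footprint `hs : Mem.SameExcept ws mem mem'` off `[lo, hi)`

For the commonest case, ONE store of the walker at a word `w`, the direct forms `mem.u32_writeLE …` below; and for a read of
the bytes just stored, `mem.u32_writeLE_same`. -/

namespace X86.User.Mem
open Vorbis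

/-- A read of `[a, a + n)` in two memories that agree on `[lo, hi) ⊇ [a, a + n)`. -/
theorem EqOn.readLE_addr {lo hi : Nat} {mem mem' : Mem} (h : EqOn lo hi mem mem') (a n : Nat) (h1 : lo ≤ a)
    (h2 : a + n ≤ hi) (h3 : hi ≤ 2 ^ 64) : mem'.readLE (addr a) n = mem.readLE (addr a) n := by
  by_cases hn : n = 0
  · subst hn
    rfl
  · have ea : (addr a).toNat = a := toNat_addr a (by omega)
    have hw : NoWrap (addr a) n := by
      unfold NoWrap
      omega
    apply readLE_congr
    intro j hj
    have ej := hw.toNat_add j hj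
    exact h _ (by omega) (by omega)

theorem EqOn.u8 {lo hi : Nat} {mem mem' : Mem} (h : EqOn lo hi mem mem') (a : Nat) (h1 : lo ≤ a) (h2 : a + 1 ≤ hi)
    (h3 : hi ≤ 2 ^ 64) : mem'.u8 a = mem.u8 a := h.readLE_addr a 1 h1 h2 h3

theorem EqOn.u16 {lo hi : Nat} {mem mem' : Mem} (h : EqOn lo hi mem mem') (a : Nat) (h1 : lo ≤ a) (h2 : a + 2 ≤ hi)
    (h3 : hi ≤ 2 ^ 64) : mem'.u16 a = mem.u16 a := h.readLE_addr a 2 h1 h2 h3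

theorem EqOn.u32 {lo hi : Nat} {mem mem' : Mem} (h : EqOn lo hi mem mem') (a : Nat) (h1 : lo ≤ a) (h2 : a + 4 ≤ hi)
    (h3 : hi ≤ 2 ^ 64) : mem'.u32 a = mem.u32 a := h.readLE_addr a 4 h1 h2 h3

theorem EqOn.u64 {lo hi : Nat} {mem mem' : Mem} (h : EqOn lo hi mem mem') (a : Nat) (h1 : lo ≤ a) (h2 : a + 8 ≤ hi)
    (h3 : hi ≤ 2 ^ 64) : mem'.u64 a = mem.u64 a := h.readLE_addr a 8 h1 h2 h3

theorem EqOn.i8 {lo hi : Nat} {mem mem' : Mem} (h : EqOn lo hi mem mem') (a : Nat) (h1 : lo ≤ a) (h2 : a + 1 ≤ hi)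
    (h3 : hi ≤ 2 ^ 64) : mem'.i8 a = mem.i8 a := congrArg sint8 (h.u8 a h1 h2 h3)

theorem EqOn.i16 {lo hi : Nat} {mem mem' : Mem} (h : EqOn lo hi mem mem') (a : Nat) (h1 : lo ≤ a) (h2 : a + 2 ≤ hi)
    (h3 : hi ≤ 2 ^ 64) : mem'.i16 a = mem.i16 a := congrArg sint16 (h.u16 a h1 h2 h3)

theorem EqOn.i32 {lo hi : Nat} {mem mem' : Mem} (h : EqOn lo hi mem mem') (a : Nat) (h1 : lo ≤ a) (h2 : a + 4 ≤ hi)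
    (h3 : hi ≤ 2 ^ 64) : mem'.i32 a = mem.i32 a := congrArg sint32 (h.u32 a h1 h2 h3)

theorem EqOn.ptr {lo hi : Nat} {mem mem' : Mem} (h : EqOn lo hi mem mem') (a : Nat) (h1 : lo ≤ a) (h2 : a + 8 ≤ hi)
    (h3 : hi ≤ 2 ^ 64) : mem'.ptr a = mem.ptr a := h.u64 a h1 h2 h3

theorem EqOn.f32bits {lo hi : Nat} {mem mem' : Mem} (h : EqOn lo hi mem mem') (a : Nat) (h1 : lo ≤ a) (h2 : a + 4 ≤ hi)
    (h3 : hi ≤ 2 ^ 64) : mem'.f32bits a = mem.f32bits a := h.u32 a h1 h2 h3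

/-- **One store of the walker, `writeLE w k v` at a word `w`, leaves exactly the bytes `[a, a + n)` alone** when the two
ranges do not meet: the `EqOn` that the typed frame facts consume. -/
theorem eqOn_writeLE (mem : Mem) (w : Word) (k v : Nat) (a n : Nat) (hw : w.toNat + k ≤ 2 ^ 64)
    (hd : a + n ≤ w.toNat ∨ w.toNat + k ≤ a) : EqOn a (a + n) mem (mem.writeLE w k v) := by
  intro b hb1 hb2
  exact read_writeLE_disjoint_noWrap mem w k v b hw (by omega)

/-- A byte read after a store elsewhere. -/
theorem u8_writeLE (mem : Mem) (w : Word) (k v a : Nat) (hw : w.toNat + k ≤ 2 ^ 64) (ha : a + 1 ≤ 2 ^ 64)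
    (hd : a + 1 ≤ w.toNat ∨ w.toNat + k ≤ a) : (mem.writeLE w k v).u8 a = mem.u8 a :=
  (eqOn_writeLE mem w k v a 1 hw hd).u8 a (Nat.le_refl _) (Nat.le_refl _) ha

/-- A `uint16` read after a store elsewhere. -/
theorem u16_writeLE (mem : Mem) (w : Word) (k v a : Nat) (hw : w.toNat + k ≤ 2 ^ 64) (ha : a + 2 ≤ 2 ^ 64)
    (hd : a + 2 ≤ w.toNat ∨ w.toNat + k ≤ a) : (mem.writeLE w k v).u16 a = mem.u16 a :=
  (eqOn_writeLE mem w k v a 2 hw hd).u16 a (Nat.le_refl _) (Nat.le_refl _) ha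

/-- A `uint32` read after a store elsewhere. -/
theorem u32_writeLE (mem : Mem) (w : Word) (k v a : Nat) (hw : w.toNat + k ≤ 2 ^ 64) (ha : a + 4 ≤ 2 ^ 64)
    (hd : a + 4 ≤ w.toNat ∨ w.toNat + k ≤ a) : (mem.writeLE w k v).u32 a = mem.u32 a :=
  (eqOn_writeLE mem w k v a 4 hw hd).u32 a (Nat.le_refl _) (Nat.le_refl _) ha

/-- A 64-bit read after a store elsewhere. -/
theorem u64_writeLE (mem : Mem) (w : Word) (k v a : Nat) (hw : w.toNat + k ≤ 2 ^ 64) (ha : a + 8 ≤ 2 ^ 64)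
    (hd : a + 8 ≤ w.toNat ∨ w.toNat + k ≤ a) : (mem.writeLE w k v).u64 a = mem.u64 a :=
  (eqOn_writeLE mem w k v a 8 hw hd).u64 a (Nat.le_refl _) (Nat.le_refl _) ha

/-- An `int8` read after a store elsewhere. -/
theorem i8_writeLE (mem : Mem) (w : Word) (k v a : Nat) (hw : w.toNat + k ≤ 2 ^ 64) (ha : a + 1 ≤ 2 ^ 64)
    (hd : a + 1 ≤ w.toNat ∨ w.toNat + k ≤ a) : (mem.writeLE w k v).i8 a = mem.i8 a :=
  congrArg sint8 (u8_writeLE mem w k v a hw ha hd)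

/-- An `int16` read after a store elsewhere. -/
theorem i16_writeLE (mem : Mem) (w : Word) (k v a : Nat) (hw : w.toNat + k ≤ 2 ^ 64) (ha : a + 2 ≤ 2 ^ 64)
    (hd : a + 2 ≤ w.toNat ∨ w.toNat + k ≤ a) : (mem.writeLE w k v).i16 a = mem.i16 a :=
  congrArg sint16 (u16_writeLE mem w k v a hw ha hd)

/-- An `int` read after a store elsewhere. -/
theorem i32_writeLE (mem : Mem) (w : Word) (k v a : Nat) (hw : w.toNat + k ≤ 2 ^ 64) (ha : a + 4 ≤ 2 ^ 64)
    (hd : a + 4 ≤ w.toNat ∨ w.toNat + k ≤ a) : (mem.writeLE w k v).i32 a = mem.i32 a :=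
  congrArg sint32 (u32_writeLE mem w k v a hw ha hd)

/-- A pointer read after a store elsewhere. -/
theorem ptr_writeLE (mem : Mem) (w : Word) (k v a : Nat) (hw : w.toNat + k ≤ 2 ^ 64) (ha : a + 8 ≤ 2 ^ 64)
    (hd : a + 8 ≤ w.toNat ∨ w.toNat + k ≤ a) : (mem.writeLE w k v).ptr a = mem.ptr a :=
  u64_writeLE mem w k v a hw ha hd

/-- A `float`'s bits read after a store elsewhere. -/
theorem f32bits_writeLE (mem : Mem) (w : Word) (k v a : Nat) (hw : w.toNat + k ≤ 2 ^ 64) (ha : a + 4 ≤ 2 ^ 64)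
    (hd : a + 4 ≤ w.toNat ∨ w.toNat + k ≤ a) : (mem.writeLE w k v).f32bits a = mem.f32bits a :=
  u32_writeLE mem w k v a hw ha hd

/-! #### Reading back what was stored: same address, same width. No side condition.
(The stepper writes a stored value as `x.toNat` of a `BitVec`; then `v % 2 ^ 32 = v` by `Nat.mod_eq_of_lt x.isLt`.) -/

/-- A byte read back. -/
theorem u8_writeLE_same (mem : Mem) (a v : Nat) : (mem.writeLE (addr a) 1 v).u8 a = v % 2 ^ 8 :=
  readLE_writeLE_same mem (addr a) 1 v (by decide)

/-- A `uint16` read back. -/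
theorem u16_writeLE_same (mem : Mem) (a v : Nat) : (mem.writeLE (addr a) 2 v).u16 a = v % 2 ^ 16 :=
  readLE_writeLE_same mem (addr a) 2 v (by decide)

/-- A `uint32` read back. -/
theorem u32_writeLE_same (mem : Mem) (a v : Nat) : (mem.writeLE (addr a) 4 v).u32 a = v % 2 ^ 32 :=
  readLE_writeLE_same mem (addr a) 4 v (by decide)

/-- A 64-bit value read back. -/
theorem u64_writeLE_same (mem : Mem) (a v : Nat) : (mem.writeLE (addr a) 8 v).u64 a = v % 2 ^ 64 :=
  readLE_writeLE_same mem (addr a) 8 v (by decide)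

/-- An `int8` read back. -/
theorem i8_writeLE_same (mem : Mem) (a v : Nat) : (mem.writeLE (addr a) 1 v).i8 a = sint8 (v % 2 ^ 8) :=
  congrArg sint8 (u8_writeLE_same mem a v)

/-- An `int16` read back. -/
theorem i16_writeLE_same (mem : Mem) (a v : Nat) : (mem.writeLE (addr a) 2 v).i16 a = sint16 (v % 2 ^ 16) :=
  congrArg sint16 (u16_writeLE_same mem a v)

/-- An `int` read back. -/
theorem i32_writeLE_same (mem : Mem) (a v : Nat) : (mem.writeLE (addr a) 4 v).i32 a = sint32 (v % 2 ^ 32) :=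
  congrArg sint32 (u32_writeLE_same mem a v)

/-- A pointer read back. -/
theorem ptr_writeLE_same (mem : Mem) (a v : Nat) : (mem.writeLE (addr a) 8 v).ptr a = v % 2 ^ 64 :=
  u64_writeLE_same mem a v

/-- A `float`'s bits read back. -/
theorem f32bits_writeLE_same (mem : Mem) (a v : Nat) : (mem.writeLE (addr a) 4 v).f32bits a = v % 2 ^ 32 :=
  u32_writeLE_same mem a v

/-- An `int` stored as the stepper stores it (the number of a 32-bit vector) and read back: its signed value. -/
theorem i32_writeLE_same_bv (mem : Mem) (a : Nat) (x : BitVec 32) : (mem.writeLE (addr a) 4 x.toNat).i32 a = x.toInt := by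
  rw [i32_writeLE_same, Nat.mod_eq_of_lt x.isLt, ← toInt_ofNat32 _ x.isLt, BitVec.ofNat_toNat, BitVec.setWidth_eq]

end X86.User.Mem

/-! ### 6. Blocks: objects as base and size, and the object-level justification of a check

A `Block` is an object of the program: a struct, an arena block, a stack object, a global, the input, the output. The live
set of Asan/Shadow.lean is a set of BYTES (`Live : Nat → Prop`); `B.live Live` says the block's bytes belong to it, and
`liveOf Bs` is the live set of a list of blocks. `acc_of_obj` is the one lemma every check site uses: the shadow covers the
live set, the block is live, the access lies inside the block ⇒ the check passes. -/

namespace Vorbis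
open X86 X86.User Asan

/-- An object: `size` bytes from `base`. -/
structure Block where
  base : Nat
  size : Nat

namespace Block

/-- One past the last byte. -/
@[vblock] def top (B : Block) : Nat := B.base + B.size

/-- The byte `x` belongs to the block. -/
@[vblock] def mem (B : Block) (x : Nat) : Prop := B.base ≤ x ∧ x < B.base + B.size

/-- The `n` bytes at `a` lie inside the block. -/
@[vblock] def contains (B : Block) (a n : Nat) : Prop := B.base ≤ a ∧ a + n ≤ B.base + B.size

/-- The two blocks do not meet. -/
@[vblock] def disjoint (B C : Block) : Prop := B.base + B.size ≤ C.base ∨ C.base + C.size ≤ B.base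

/-- The part of the block at `off`, `size` bytes (a field of a struct, an element of an array). -/
@[vblock] def sub (B : Block) (off size : Nat) : Block := ⟨B.base + off, size⟩

/-- The block as a window of a footprint (`Mem.SameExcept`, `Spec.writes`). -/
@[vblock] def span (B : Block) : Span := ⟨B.base, B.base + B.size⟩

/-- **The block is live**: all its bytes belong to the live set (`B ⊆ Live`). -/
@[vblock] def live (Live : Nat → Prop) (B : Block) : Prop := InLive Live B.base B.size

/-- **The block reads the same in `mem'` as in `mem`**: the model's `Mem.EqOn` on its bytes. Use the typed frame facts on it
directly: `h.i32 a h1 h2 h3` with `h : B.Same mem mem'`. -/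
@[vblock] abbrev Same (B : Block) (mem mem' : Mem) : Prop := Mem.EqOn B.base (B.base + B.size) mem mem'

theorem disjoint.symm {B C : Block} (h : B.disjoint C) : C.disjoint B := Or.symm h

/-- A part of a block lies inside it. -/
theorem contains_sub (B : Block) (off size : Nat) (h : off + size ≤ B.size) : B.contains (B.sub off size).base size := by
  simp only [contains, sub]
  omega

/-- An access inside a part is an access inside the block. -/
theorem contains.of_sub {B : Block} {off size a n : Nat} (h : (B.sub off size).contains a n) (hs : off + size ≤ B.size) :
    B.contains a n := by
  simp only [contains, sub] at *
  omega

/-- Parts of disjoint blocks are disjoint. -/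
theorem disjoint.sub {B C : Block} (h : B.disjoint C) (off size : Nat) (hs : off + size ≤ B.size) :
    (B.sub off size).disjoint C := by
  simp only [disjoint, Block.sub] at *
  omega

/-- Two parts of one block that do not overlap. -/
theorem sub_disjoint_sub (B : Block) (o1 s1 o2 s2 : Nat) (h : o1 + s1 ≤ o2 ∨ o2 + s2 ≤ o1) :
    (B.sub o1 s1).disjoint (B.sub o2 s2) := by
  simp only [disjoint, Block.sub]
  omega

/-- "Live" byte by byte. -/
theorem live_iff (Live : Nat → Prop) (B : Block) : B.live Live ↔ ∀ x, B.mem x → Live x := by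
  unfold live InLive mem
  constructor
  · intro h x hx
    have := h (x - B.base) (by omega)
    have e : B.base + (x - B.base) = x := by omega
    rw [e] at this
    exact this
  · intro h i hi
    exact h _ (by omega)

/-- **An access inside a live block is an access to live bytes.** -/
theorem live.inLive {Live : Nat → Prop} {B : Block} (h : B.live Live) {a n : Nat} (hc : B.contains a n) : InLive Live a n :=
  InLive.sub h a n hc.1 hc.2

/-- A part of a live block is live. -/
theorem live.sub {Live : Nat → Prop} {B : Block} (h : B.live Live) (off size : Nat) (hs : off + size ≤ B.size) :
    (B.sub off size).live Live :=
  h.inLive (B.contains_sub off size hs)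

/-- A bigger live set. -/
theorem live.mono {Live Live' : Nat → Prop} {B : Block} (h : B.live Live) (hl : ∀ x, Live x → Live' x) : B.live Live' :=
  InLive.mono h hl

/-- **A live block lies in the program's data space** `[100000H, C00000H)` (so none of its addresses wraps, and none is in the
shadow). -/
theorem live.inside {Live : Nat → Prop} {mem : Mem} {B : Block} (h : B.live Live) (hc : Covers Live mem)
    (hs : 0 < B.size) : 0x100000 ≤ B.base ∧ B.base + B.size ≤ 0xC00000 := by
  have h0 := hc.inside (B.base + 0) (h 0 hs)
  have h1 := hc.inside (B.base + (B.size - 1)) (h (B.size - 1) (by omega))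
  omega

end Block

/-- The live set of a list of blocks: the bytes of any of them. -/
def liveOf (Bs : List Block) : Nat → Prop := fun x => ∃ B, B ∈ Bs ∧ B.mem x

/-- A block of the list is live in the list's live set. -/
theorem Block.live_of_mem {Bs : List Block} {B : Block} (h : B ∈ Bs) : B.live (liveOf Bs) := by
  rw [Block.live_iff]
  intro x hx
  exact ⟨B, h, hx⟩

/-- A longer list has a bigger live set. -/
theorem liveOf_mono {Bs Bs' : List Block} (h : ∀ B, B ∈ Bs → B ∈ Bs') (x : Nat) (hx : liveOf Bs x) : liveOf Bs' x := by
  obtain ⟨B, hB, hm⟩ := hx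
  exact ⟨B, h B hB, hm⟩

/-- The live set of `B :: Bs`: the bytes of `B` or of `Bs` (allocation adds a block, freeing the top temp block removes it). -/
theorem liveOf_cons (B : Block) (Bs : List Block) (x : Nat) : liveOf (B :: Bs) x ↔ B.mem x ∨ liveOf Bs x := by
  unfold liveOf
  constructor
  · intro h
    obtain ⟨C, hC, hm⟩ := h
    cases List.mem_cons.mp hC with
    | inl e => exact Or.inl (e ▸ hm)
    | inr hin => exact Or.inr ⟨C, hin, hm⟩
  · intro h
    cases h with
    | inl hm => exact ⟨B, List.mem_cons_self, hm⟩
    | inr hr =>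
      obtain ⟨C, hC, hm⟩ := hr
      exact ⟨C, List.mem_cons_of_mem B hC, hm⟩

/-! #### The check sites -/

/-- **`acc_of_obj`, the one lemma every 1-, 2-, 4-, 8-byte check site uses**: the shadow covers the live set, the block is
live, the `n` bytes at `a` lie inside the block ⇒ `__asan_loadN / storeN_noabort(a)` returns. (`n ≤ 8` is not needed for the
proof; it is what these checks are called with.) -/
theorem acc_of_obj {Live : Nat → Prop} {mem : Mem} {B : Block} {a n : Nat} (hc : Covers Live mem) (hB : B.live Live)
    (h1 : B.base ≤ a) (h2 : a + n ≤ B.base + B.size) (hn : 1 ≤ n) : AccessibleSmall mem a n :=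
  hc.accessibleSmall hn (hB.inLive ⟨h1, h2⟩)

/-- **The same for the range checks** (`__asan_load16 / store16 / storeN_noabort`: `n` = 16, 1808, any `n ≥ 1`). -/
theorem acc_of_obj_range {Live : Nat → Prop} {mem : Mem} {B : Block} {a n : Nat} (hc : Covers Live mem)
    (hB : B.live Live) (h1 : B.base ≤ a) (h2 : a + n ≤ B.base + B.size) (hn : 1 ≤ n) : Accessible mem a n :=
  hc.accessible hn (hB.inLive ⟨h1, h2⟩)

/-- **A field access**: the `n` bytes at offset `off` of the object at `B.base` (`off` is `Off.S.x`, or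
`Off.S.x + elem * i` for an array element). -/
theorem acc_of_field {Live : Nat → Prop} {mem : Mem} {B : Block} (hc : Covers Live mem) (hB : B.live Live) (off n : Nat)
    (h : off + n ≤ B.size) (hn : 1 ≤ n) : AccessibleSmall mem (B.base + off) n :=
  acc_of_obj hc hB (Nat.le_add_right _ _) (by omega) hn

/-- `acc_of_obj` for the value of the register the check is called with: `rdi = addr a`. -/
theorem acc_of_obj_addr {Live : Nat → Prop} {mem : Mem} {B : Block} {a n : Nat} (hc : Covers Live mem) (hB : B.live Live)
    (h1 : B.base ≤ a) (h2 : a + n ≤ B.base + B.size) (hn : 1 ≤ n) : AccessibleSmall mem (addr a).toNat n := by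
  have hin := hc.inside (a + 0) (hB.inLive ⟨h1, h2⟩ 0 hn)
  rw [toNat_addr a (by omega)]
  exact acc_of_obj hc hB h1 h2 hn

/-- The range form of `acc_of_obj_addr`. -/
theorem acc_of_obj_range_addr {Live : Nat → Prop} {mem : Mem} {B : Block} {a n : Nat} (hc : Covers Live mem)
    (hB : B.live Live) (h1 : B.base ≤ a) (h2 : a + n ≤ B.base + B.size) (hn : 1 ≤ n) : Accessible mem (addr a).toNat n := by
  have hin := hc.inside (a + 0) (hB.inLive ⟨h1, h2⟩ 0 hn)
  rw [toNat_addr a (by omega)]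
  exact acc_of_obj_range hc hB h1 h2 hn

/-- **The access itself**: inside a live block it is inside the user region (the side condition `L.Has` of the load or store
that follows the check), for a layout that maps at least the low 12 MB. -/
theorem has_of_obj {L : Layout} {Live : Nat → Prop} {mem : Mem} {B : Block} {a n : Nat} (hc : Covers Live mem)
    (hB : B.live Live) (h1 : B.base ≤ a) (h2 : a + n ≤ B.base + B.size) (hn : 1 ≤ n) (hL : 0xC00000 ≤ L.hi) :
    L.Has (addr a) n := by
  have hlive : InLive Live a n := hB.inLive ⟨h1, h2⟩
  have hin := hc.inside (a + 0) (hlive 0 hn)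
  apply hc.has hn _ hL
  rw [toNat_addr a (by omega)]
  exact hlive

/-! #### Frame at the level of blocks -/

namespace Block

/-- Nothing changed. -/
theorem Same.refl (B : Block) (mem : Mem) : B.Same mem mem := Mem.EqOn.refl _ _ mem

/-- A part of a block that reads the same reads the same. -/
theorem Same.sub {B : Block} {mem mem' : Mem} (h : B.Same mem mem') (off size : Nat) (hs : off + size ≤ B.size) :
    (B.sub off size).Same mem mem' := by
  simp only [Same, Block.sub]
  exact Mem.EqOn.mono h (by omega) (by omega)

/-- **A store inside a block `C` keeps every block disjoint from `C`** (the store as the walker has it: `writeLE (addr b) k v`). -/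
theorem Same.of_writeLE {B C : Block} (mem : Mem) (b k v : Nat) (hd : B.disjoint C) (hc : C.contains b k)
    (hC : C.base + C.size ≤ 2 ^ 64) : B.Same mem (mem.writeLE (addr b) k v) := by
  unfold contains at hc
  unfold disjoint at hd
  by_cases hk : k = 0
  · subst hk
    exact Mem.EqOn.refl _ _ mem
  · have e : (addr b).toNat = b := toNat_addr b (by omega)
    intro x hx1 hx2
    exact Mem.read_writeLE_disjoint_noWrap mem (addr b) k v x (by unfold Mem.NoWrap; omega) (by omega)

/-- **A callee whose footprint does not meet the block keeps it.** -/
theorem Same.of_sameExcept {B : Block} {mem mem' : Mem} {ws : List Span} (hs : Mem.SameExcept ws mem mem')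
    (hd : ∀ w, w ∈ ws → B.base + B.size ≤ w.lo ∨ w.hi ≤ B.base) : B.Same mem mem' :=
  hs.eqOn _ _ hd

/-- One step further. -/
theorem Same.trans {B : Block} {mem mem' mem'' : Mem} (h1 : B.Same mem mem') (h2 : B.Same mem' mem'') : B.Same mem mem'' :=
  Mem.EqOn.trans h1 h2

end Block
end Vorbis
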